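/- GENERATED by tools/from_farm_form.py from prooffarm-gif/accepted/DGifDecreaseImageCounter.1/Lemmas.lean (a worked proof of the farm's unit `DGifDecreaseImageCounter.1`,
   accepted by the verdict) — do not edit. -/
import Gif.Spec.Units.DGifDecreaseImageCounter_1
import Gif.Spec.AllSegs

/-!
  The pure lemmas of unit `DGifDecreaseImageCounter.1` (10A460H … 10A4B1H; dgif_lib.c:1156-1160): nothing here walks code.

    §1  the machine words of `ImageCount - 1` and of `&SavedImages[ImageCount]`;
    §2  what the entry's precondition says about the array, its last slot and where the objects are (`dic1_entry_facts`);
    §3  the state after the store `ImageCount--` (`dic1_after_store`): the heap's invariant under the function's frame, the shape of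
        the forest without the dropped image, the dropped slot's colour-map field, the reader's measure;
    §4  the state after `free(RasterBits)` (`dic1_after_free`): the same facts through `free`'s footprint, and what is still owned.
-/

open X86 X86.User Asan ProgX ProgX.Base ProgX.Base.Spec Gif.Spec

namespace Gif.Spec.DGifDecreaseImageCounter_1

/-! ### 1. Machine words -/

/-- `lea ebp, [rax - 1]` (l.1157) of the loaded count `n + 1`: the 32-bit value `n`. -/
theorem dic1_dec32 (n : Nat) :
    BitVec.setWidth 32 (Word.ofBV (BitVec.ofNat 32 (n + 1)) - 1).toBitVec = BitVec.ofNat 32 n := by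
  apply BitVec.eq_of_toNat_eq
  have e1 : (1 : Word).toNat = 1 := rfl
  rw [BitVec.toNat_setWidth, UInt64.toNat_toBitVec, UInt64.toNat_sub, e1, toNat_ofBV32, BitVec.toNat_ofNat, BitVec.toNat_ofNat]
  omega

/-- `(x * 8 - x) << 3` is `x * 56` (gcc's `&SavedImages[i]`: 56-byte elements). -/
theorem dic1_bv56 (x : BitVec 64) : (x * 8#64 - x) <<< 3 = x * 56#64 := by
  bv_decide

/-- The address of slot `n` of the array at `a` (l.1158: `lea rbp, [rax*8] ; sub rbp, rax ; shl rbp, 3 ; add rbp, [rbx+0x48]`). -/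
theorem dic1_slot (a n : Nat) :
    (UInt64.ofNat n * 8 - UInt64.ofNat n) <<< 3 + UInt64.ofNat a = UInt64.ofNat (a + 56 * n) := by
  have h1 : (UInt64.ofNat n * 8 - UInt64.ofNat n) <<< 3 = UInt64.ofNat n * 56 := by
    apply UInt64.toBitVec_inj.mp
    exact dic1_bv56 (UInt64.ofNat n).toBitVec
  rw [h1]
  apply UInt64.toNat_inj.mp
  have e56 : (56 : Word).toNat = 56 := rfl
  rw [UInt64.toNat_add, UInt64.toNat_mul, e56, UInt64.toNat_ofNat', UInt64.toNat_ofNat', UInt64.toNat_ofNat']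
  omega

/-! ### 2. The entry -/

/-- The last counted slot of the array agrees with the last image. -/
theorem dic1_last_imgAt {s : Saved} {p c : Nat} {init : List Img} {g : Img} {mem : Mem} (h : SavedAt (some s) p c mem)
    (hi : s.imgs = init ++ [g]) : ImgAt (s.arr + 56 * init.length) g mem := by
  obtain ⟨arr, cap, imgs⟩ := s
  simp only at hi
  subst hi
  obtain ⟨_, _, _, _, k5⟩ := h
  have hlt : init.length < (init ++ [g]).length := by
    simp only [List.length_append, List.length_singleton]
    omega
  have hk := k5 init.length hlt
  simp only [List.getElem_append_right (Nat.le_refl _), Nat.sub_self, List.getElem_cons_zero] at hk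
  exact hk

/-- **What the precondition says at the entry**: the array `s` of the forest with the images `init ++ [g]`; the two fields of gif;
the last slot; where gif and the array are (numbers, for the walker and `omega`). -/
theorem dic1_entry_facts {H : Heap} {rest : List Obj} {frames : List (Nat × FrameLayout)} {F : Forest} {R : Rd} {e : State}
    {init : List Img} {g : Img} (henv : Env H rest frames F R e) (himgs : F.imgs = init ++ [g]) :
    ∃ s, F.saved = some s ∧ s.imgs = init ++ [g] ∧ init.length + 1 ≤ s.cap ∧
      rd e.mem (F.gif + 72) 8 = s.arr ∧ rd e.mem (F.gif + 32) 4 = init.length + 1 ∧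
      ImgAt (s.arr + 56 * init.length) g e.mem ∧
      0x800040 ≤ F.gif ∧ F.gif + 152 ≤ 0xC00000 ∧ 0x800040 ≤ s.arr ∧ s.arr + 56 * s.cap + 32 ≤ 0xC00000 ∧
      (F.gif + 184 ≤ s.arr ∨ s.arr + 56 * s.cap + 64 ≤ F.gif) := by
  have hp := henv.heap
  have hok := henv.ok
  have hbase := hp.base
  obtain ⟨s, hsaved, hsimgs⟩ : ∃ s, F.saved = some s ∧ s.imgs = init ++ [g] := by
    cases hs : F.saved with
    | none =>
      rw [Forest.imgs_none hs] at himgs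
      exact absurd himgs.symm (List.append_ne_nil_of_right_ne_nil _ (List.cons_ne_nil _ _))
    | some s =>
      rw [Forest.imgs_some hs] at himgs
      exact ⟨s, rfl, himgs⟩
  have hgmem : (F.gif, 120) ∈ F.owned := List.mem_cons_self
  have hamem : (s.arr, 56 * s.cap) ∈ F.owned := by
    apply Forest.mem_owned_saved
    rw [hsaved]
    exact List.mem_cons_self
  have hgin := hok.owns.inside hp.inv.heap hgmem
  have hain := hok.owns.inside hp.inv.heap hamem
  simp only at hgin hain
  rw [hbase] at hgin hain
  have hne : ((F.gif, 120) : Nat × Nat) ≠ (s.arr, 56 * s.cap) := by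
    intro heq
    have e1 : F.gif = s.arr := congrArg Prod.fst heq
    have hst : (s.arr, 56 * s.imgs.length) ∈ F.structs := by
      apply carry_mem_structs_saved
      rw [hsaved]
      exact List.mem_cons_self
    exact ((hok.owns.placed hp.inv.heap).structs_ne.1 _ hst).1 e1.symm
  have hfar := hok.owns.far hp.inv.heap hgmem hamem hne
  simp only at hfar
  have hsv := hok.shape.saved
  rw [hsaved] at hsv
  have himg := dic1_last_imgAt hsv hsimgs
  obtain ⟨k1, k2, k3, _, _⟩ := hsv
  have hlen : s.imgs.length = init.length + 1 := by
    rw [hsimgs]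
    simp only [List.length_append, List.length_singleton]
  rw [hlen] at k2 k3
  simp only [gfield] at k1 k2
  refine ⟨s, hsaved, hsimgs, k3, k1, k2, himg, ?_, ?_, ?_, ?_, ?_⟩
  · omega
  · omega
  · omega
  · omega
  · omega

/-! ### 3. After the store `ImageCount--` -/

/-- **Every structural window of the array and its images is untouched by a footprint of stack below the cursor and of the
`ImageCount` field of gif** (the windows of the function's own stores). -/
theorem dic1_structs_kept {H : Heap} {rest : List Obj} {frames : List (Nat × FrameLayout)} {F : Forest} {R : Rd} {e : State}
    {m : Mem} (henv : Env H rest frames F R e)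
    (hsame : Mem.SameExcept [⟨(e.reg .rsp).toNat - 176, (e.reg .rsp).toNat⟩, ⟨F.gif + 32, F.gif + 36⟩] e.mem m) :
    ∀ o, o ∈ Saved.structs F.saved → Mem.EqOn o.1 (o.1 + o.2) e.mem m ∧ o.1 + o.2 < 2 ^ 64 := by
  have hp := henv.heap
  have hok := henv.ok
  have hbase := hp.base
  have hcur := henv.ctx.cursor_range hp.inv.shadow
  have G := carry_Geo.intro hok.shape (hok.owns.placed hp.inv.heap) hp.inv.heap ⟨hcur.1, hcur.2.1⟩
  intro o ho
  have hos : o ∈ F.structs := carry_mem_structs_saved ho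
  obtain ⟨x, hx, hxb, hxc⟩ := G.structObj o hos
  have hxr := hp.inv.heap.obj_range hx
  have hxd := G.inData x hx
  rw [hbase] at hxr
  obtain ⟨y, hy, hyb, hyc⟩ := G.gifObj
  refine ⟨?_, by omega⟩
  apply hsame.eqOn
  intro w hw
  rcases List.mem_cons.mp hw with rfl | hw
  · -- the stack lies below the heap's region
    right
    simp only
    omega
  · have ew : w = ⟨F.gif + 32, F.gif + 36⟩ := List.mem_singleton.mp hw
    subst ew
    -- a window inside gif misses every structural window (none has the base of gif)
    have hin := (G.in_obj hy (w := ⟨F.gif + 32, F.gif + 36⟩) (by simp only; omega) (by simp only; omega)).2.2.1 o hos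
      (by rw [hyb]; exact (G.struct_ne o hos).1)
    simp only at hin ⊢
    omega

/-- **THE STATE AFTER THE STORE `GifFile->ImageCount--`** (10A478H, l.1157), for any memory `m` that differs from the entry's in the
function's own stack and in the `ImageCount` field, which now holds `init.length`: the heap's invariant with the clean stack ending
under the function's frame; the shape of the forest WITHOUT the dropped image (`Shape.set_saved`, `SavedAt.drop_last`); the dropped
slot still agrees with the dropped image `g` (its bytes were not touched); the reader's measure. -/
theorem dic1_after_store {H : Heap} {rest : List Obj} {frames : List (Nat × FrameLayout)} {F : Forest} {R : Rd} {e : State}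
    {init : List Img} {g : Img} {s : Saved} {m : Mem} (henv : Env H rest frames F R e) (hsaved : F.saved = some s)
    (hsimgs : s.imgs = init ++ [g])
    (hsame : Mem.SameExcept [⟨(e.reg .rsp).toNat - 176, (e.reg .rsp).toNat⟩, ⟨F.gif + 32, F.gif + 36⟩] e.mem m)
    (hun : ShadowUntouched e.mem m) (hcnt : rd m (F.gif + 32) 4 = init.length)
    (halign : (e.reg .rsp).toNat % 8 = 0) (hroom : 0x700000 + 176 ≤ (e.reg .rsp).toNat)
    (htop : (e.reg .rsp).toNat + 8 ≤ 0x800000) :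
    HeapInv H rest frames ((e.reg .rsp).toNat - 24) m ∧
    Shape (DGifDecreaseImageCounter.dropped F s init) R m ∧
    ImgAt (s.arr + 56 * init.length) g m ∧
    rem R m = rem R e.mem := by
  have hp := henv.heap
  have hok := henv.ok
  have hbase := hp.base
  have hcur := henv.ctx.cursor_range hp.inv.shadow
  have hgin := hok.owns.inside hp.inv.heap (o := (F.gif, 120)) List.mem_cons_self
  simp only at hgin
  rw [hbase] at hgin
  have hg1 := hgin.1
  have hg2 := hgin.2.2.2.2
  clear hgin
  have hkept := dic1_structs_kept henv hsame
  refine ⟨?_, ?_, ?_, ?_⟩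
  · -- the heap's invariant: a stack window and a window inside gif; then the stack pointer goes down
    have hinv : HeapInv H rest frames ((e.reg .rsp).toNat + 8) m := by
      refine hp.inv.sameExcept hun hsame ?_
      intro w hw
      rcases List.mem_cons.mp hw with rfl | hw
      · left
        left
        rw [hbase]
        simp only
        omega
      · have ew : w = ⟨F.gif + 32, F.gif + 36⟩ := List.mem_singleton.mp hw
        subst ew
        exact HeapWin.gif hp.inv.heap hok.owns (by simp only; omega) (by simp only; omega)
    exact hinv.lower (by omega) (by omega) (by omega)
  · -- the shape: the array with its old slots in the new memory, the last one dropped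
    have hsv := hok.shape.saved
    rw [hsaved] at hsv
    have hsv1 : SavedAt (some s) (GifFileType.SavedImages e.mem F.gif) (GifFileType.ImageCount e.mem F.gif) m := by
      apply hsv.frame
      · intro o ho
        exact (hkept o (by rw [hsaved]; exact ho)).1
      · intro o ho
        exact (hkept o (by rw [hsaved]; exact ho)).2
    have hsv2 := hsv1.drop_last hsimgs
    have hlen : s.imgs.length = init.length + 1 := by
      rw [hsimgs]
      simp only [List.length_append, List.length_singleton]
    have ecnt : GifFileType.ImageCount e.mem F.gif = init.length + 1 := by
      rw [hsv.2.1, hlen]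
    have e1 : GifFileType.SavedImages m F.gif = GifFileType.SavedImages e.mem F.gif := by
      simp only [gfield]
      apply hsame.rd (F.gif + 72) 8 (by omega)
      intro w hw
      rcases List.mem_cons.mp hw with rfl | hw
      · right
        simp only
        omega
      · have ew : w = ⟨F.gif + 32, F.gif + 36⟩ := List.mem_singleton.mp hw
        subst ew
        right
        simp only
        omega
    have e2 : GifFileType.ImageCount m F.gif = GifFileType.ImageCount e.mem F.gif - 1 := by
      rw [ecnt]
      simp only [gfield]
      rw [hcnt]
      omega
    rw [← e1, ← e2] at hsv2
    refine hok.shape.set_saved (H := H) (hok.owns.placed hp.inv.heap) hp.inv.heap ⟨hcur.1, hcur.2.1⟩ hsame ?_ _ hsv2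
    intro w hw
    rcases List.mem_cons.mp hw with rfl | hw
    · left
      exact Loose.stack hp.inv.heap (by simp only; omega) (by simp only; omega) (by simp only; omega)
    · have ew : w = ⟨F.gif + 32, F.gif + 36⟩ := List.mem_singleton.mp hw
      subst ew
      right
      right
      left
      exact ⟨Nat.le_refl _, Nat.le_refl _⟩
  · -- the dropped slot: a counted slot of the old array, whose windows were not touched
    have hsv := hok.shape.saved
    rw [hsaved] at hsv
    have hsv1 : SavedAt (some s) (GifFileType.SavedImages e.mem F.gif) (GifFileType.ImageCount e.mem F.gif) m := by
      apply hsv.frame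
      · intro o ho
        exact (hkept o (by rw [hsaved]; exact ho)).1
      · intro o ho
        exact (hkept o (by rw [hsaved]; exact ho)).2
    exact dic1_last_imgAt hsv1 hsimgs
  · -- the reader's measure: the cursor lies above the function's stack, off the heap
    apply rem_sameExcept hsame (by omega)
    intro w hw
    rcases List.mem_cons.mp hw with rfl | hw
    · left
      simp only
      omega
    · have ew : w = ⟨F.gif + 32, F.gif + 36⟩ := List.mem_singleton.mp hw
      subst ew
      right
      simp only
      omega

/-! ### 4. After `free(RasterBits)` -/

/-- A footprint with its first window widened. -/
theorem dic1_widen {ws : List Span} {m m' : Mem} {a b a' b' : Nat} (h : Mem.SameExcept (⟨a, b⟩ :: ws) m m') (h1 : a' ≤ a)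
    (h2 : b ≤ b') : Mem.SameExcept (⟨a', b'⟩ :: ws) m m' := by
  refine h.mono ?_
  intro w hw x hx1 hx2
  rcases List.mem_cons.mp hw with rfl | hw
  · refine ⟨⟨a', b'⟩, List.mem_cons_self, ?_, ?_⟩
    · simp only at hx1 ⊢
      omega
    · simp only at hx2 ⊢
      omega
  · exact ⟨w, List.mem_cons_of_mem _ hw, hx1, hx2⟩

/-- **THE STATE AFTER `free(sp->RasterBits)`** (10A4ACH, l.1159), for the memory `m` before the call and any memory `m'` that differs
from it in `free`'s footprint (stack, the state word of the raster's header, the raster's shadow): the shape of the forest without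
the dropped image (`Shape.sameExcept`: all three windows are loose), the dropped slot's colour-map field (the slot lies in the array,
the map object is another object: both 64 bytes away from the raster's header), the reader's measure, and what is owned in the heap
without the raster (`Owns.release_head`). -/
theorem dic1_after_free {H : Heap} {rest : List Obj} {frames : List (Nat × FrameLayout)} {F : Forest} {R : Rd} {e : State}
    {init : List Img} {g : Img} {s : Saved} {m m' : Mem} {p n top : Nat} (henv : Env H rest frames F R e)
    (hinv : HeapInv H rest frames top m) (hshape : Shape (DGifDecreaseImageCounter.dropped F s init) R m)
    (hcm : MapAt g.cm (SavedImage.ImageDesc.ColorMap m (s.arr + 56 * init.length)) m)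
    (hown : Owns H ((p, n) :: (Map.objs g.cm ++ (DGifDecreaseImageCounter.dropped F s init).owned)))
    (hcap : init.length + 1 ≤ s.cap)
    (hsame : Mem.SameExcept [⟨(e.reg .rsp).toNat - 176, (e.reg .rsp).toNat⟩, ⟨p - 24, p - 16⟩,
      ⟨0xC00000 + p / 8, 0xC00000 + (p + n + 7) / 8⟩] m m')
    (hroom : 0x700000 + 176 ≤ (e.reg .rsp).toNat) (htop : (e.reg .rsp).toNat + 8 ≤ 0x800000) :
    Shape (DGifDecreaseImageCounter.dropped F s init) R m' ∧
    MapAt g.cm (SavedImage.ImageDesc.ColorMap m' (s.arr + 56 * init.length)) m' ∧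
    rem R m' = rem R m ∧
    Owns (H.release p) (Map.objs g.cm ++ (DGifDecreaseImageCounter.dropped F s init).owned) := by
  have hbase := henv.heap.base
  have hcur := henv.ctx.cursor_range henv.heap.inv.shadow
  have hok := hinv.heap
  obtain ⟨hplive, hrest, hpne⟩ := hown.of_cons
  simp only at hplive hpne
  obtain ⟨c, hpc⟩ := hplive
  have hpr := hok.obj_range hpc
  have hpi := hok.obj_inside hpc
  have hps := hok.size_le_cap hpc
  rw [hbase] at hpr
  simp only at hpr hpi hps
  -- every other owned object is 64 bytes away from the raster
  have hfar : ∀ x, x ∈ Map.objs g.cm ++ (DGifDecreaseImageCounter.dropped F s init).owned →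
      x.1 + x.2 + 64 ≤ p ∨ p + n + 64 ≤ x.1 := by
    intro x hx
    have hne : x ≠ (p, n) := by
      intro heq
      exact hpne x hx (congrArg Prod.fst heq).symm
    exact hown.far hok (List.mem_cons_of_mem _ hx) List.mem_cons_self hne
  -- the three windows of `free` miss a range that lies inside such an object
  have hmiss : ∀ x, x ∈ Map.objs g.cm ++ (DGifDecreaseImageCounter.dropped F s init).owned → ∀ lo hi, x.1 ≤ lo → hi ≤ x.1 + x.2 →
      ∀ w, w ∈ [(⟨(e.reg .rsp).toNat - 176, (e.reg .rsp).toNat⟩ : Span), ⟨p - 24, p - 16⟩,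
        ⟨0xC00000 + p / 8, 0xC00000 + (p + n + 7) / 8⟩] → hi ≤ w.lo ∨ w.hi ≤ lo := by
    intro x hx lo hi h1 h2 w hw
    have hf := hfar x hx
    have hxin := hrest.inside hok hx
    rw [hbase] at hxin
    have hx1 := hxin.1
    have hx2 := hxin.2.2.2.2
    clear hxin
    rcases List.mem_cons.mp hw with rfl | hw
    · right
      simp only
      omega
    · rcases List.mem_cons.mp hw with rfl | hw
      · simp only
        omega
      · have ew : w = ⟨0xC00000 + p / 8, 0xC00000 + (p + n + 7) / 8⟩ := List.mem_singleton.mp hw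
        subst ew
        left
        simp only
        omega
  refine ⟨?_, ?_, ?_, ?_⟩
  · -- the shape: all three windows are loose
    have hdrop : Owns H (DGifDecreaseImageCounter.dropped F s init).owned := hrest.sublist (List.sublist_append_right _ _)
    refine hshape.sameExcept (hdrop.placed hok) hok ⟨hcur.1, hcur.2.1⟩ hsame ?_
    intro w hw
    rcases List.mem_cons.mp hw with rfl | hw
    · exact Loose.stack hok (by simp only; omega) (by simp only; omega) (by simp only; omega)
    · rcases List.mem_cons.mp hw with rfl | hw
      · exact Loose.header hok ⟨hcur.1, hcur.2.1⟩ hpc (by simp only; omega) (by simp only; omega)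
      · have ew : w = ⟨0xC00000 + p / 8, 0xC00000 + (p + n + 7) / 8⟩ := List.mem_singleton.mp hw
        subst ew
        exact Loose.shadow hok hcur.2.1 (by simp only; omega)
  · -- the colour-map field of the dropped slot, and the map object
    have hamem : (s.arr, 56 * s.cap) ∈ Map.objs g.cm ++ (DGifDecreaseImageCounter.dropped F s init).owned := by
      apply List.mem_append_right
      apply Forest.mem_owned_saved
      exact List.mem_cons_self
    have hain := hrest.inside hok hamem
    have ha2 := hain.2.2.2.2
    clear hain
    simp only at ha2
    have e1 : SavedImage.ImageDesc.ColorMap m' (s.arr + 56 * init.length) =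
        SavedImage.ImageDesc.ColorMap m (s.arr + 56 * init.length) := by
      simp only [gfield]
      apply (hsame.eqOn (s.arr + 56 * init.length + 24) (s.arr + 56 * init.length + 24 + 8) ?_).rd _ 8 (Nat.le_refl _)
        (Nat.le_refl _) (by omega)
      exact hmiss _ hamem _ _ (by simp only; omega) (by simp only; omega)
    rw [e1]
    apply hcm.frame
    · intro o ho
      have homem : (o.1, 24) ∈ Map.objs g.cm ++ (DGifDecreaseImageCounter.dropped F s init).owned := by
        apply List.mem_append_left
        cases hg : g.cm with
        | none =>
          rw [hg] at ho
          exact absurd ho List.not_mem_nil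
        | some x =>
          rw [hg] at ho
          have eo : o = (x.obj, 24) := List.mem_singleton.mp ho
          rw [eo]
          exact List.mem_cons_self
      have eo2 : o.2 = 24 := by
        cases hg : g.cm with
        | none =>
          rw [hg] at ho
          exact absurd ho List.not_mem_nil
        | some x =>
          rw [hg] at ho
          have eo : o = (x.obj, 24) := List.mem_singleton.mp ho
          rw [eo]
      apply hsame.eqOn
      rw [eo2]
      exact hmiss _ homem _ _ (Nat.le_refl _) (Nat.le_refl _)
    · intro x hx
      have hxmem : (x.obj, 24) ∈ Map.objs g.cm ++ (DGifDecreaseImageCounter.dropped F s init).owned := by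
        apply List.mem_append_left
        rw [hx]
        exact List.mem_cons_self
      have hxin := hrest.inside hok hxmem
      have hx2 := hxin.2.2.2.2
      simp only at hx2
      omega
  · -- the reader's measure: the cursor is a stack object above the function's frame
    apply rem_sameExcept hsame (by omega)
    intro w hw
    rcases List.mem_cons.mp hw with rfl | hw
    · left
      simp only
      omega
    · rcases List.mem_cons.mp hw with rfl | hw
      · right
        simp only
        omega
      · have ew : w = ⟨0xC00000 + p / 8, 0xC00000 + (p + n + 7) / 8⟩ := List.mem_singleton.mp hw
        subst ew
        right
        simp only
        omega
  · exact hown.release_head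

end Gif.Spec.DGifDecreaseImageCounter_1
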